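-- pv_equiv track=rewrite | github.com/Leocrydis/SheetMetalLabelPrint | app/events/location_breakdown.py | breakdown_path
-- ===== SOURCE A (Python) =====
-- catalog = "CATALOG"
--
-- chainAccounts = ["OG", "OBS", "LH", "CG", "BB", "RL", "Ruths Chris", "CH", "FPS"]
--
-- def breakdown_path(path):
--     if ':' in path:
--         path = path.split(':', 1)[1]
--
--     parts = path.split('\\')
--     num_parts = len(parts)
--     customer_location = ""
--     location_folder = ""
--     item_number = ""
--     found_chain_account = False
--
--     if num_parts == 7:
--         customer_location = parts[1]
--         location_folder = parts[4]
--         item_number = parts[5]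
--     elif num_parts == 6:
--         if catalog in path:
--             customer_location = parts[1]
--             location_folder = parts[2]
--             item_number = parts[3]
--         else:
--             for chain_account in chainAccounts:
--                 if chain_account in path:
--                     customer_location = parts[1]
--                     location_folder = parts[3]
--                     item_number = parts[4]
--                     found_chain_account = True
--                     break
--             if not found_chain_account:
--                 customer_location = parts[2]
--                 location_folder = parts[3]
--                 item_number = parts[4]
--     elif num_parts == 5:
--         if catalog in path:
--             customer_location = parts[1]
--             location_folder = parts[2]
--             item_number = ""
--         else:
--             for chain_account in chainAccounts:
--                 if chain_account in path:
--                     customer_location = parts[1]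
--                     location_folder = parts[2]
--                     item_number = parts[3]
--                     found_chain_account = True
--                     break
--             if not found_chain_account:
--                 customer_location = parts[1]
--                 location_folder = parts[2]
--                 item_number = parts[3]
--     elif num_parts == 4:
--         if catalog in path:
--             customer_location = parts[1]
--             location_folder = parts[2]
--             item_number = ""
--         else:
--             for chain_account in chainAccounts:
--                 if chain_account in path:
--                     customer_location = parts[1]
--                     location_folder = parts[2]
--                     item_number = parts[3]
--                     found_chain_account = True
--                     break
--             if not found_chain_account:
--                 customer_location = parts[1]
--                 location_folder = parts[2]
--                 item_number = parts[3]
--     elif num_parts == 3: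
--         if catalog in path:
--             customer_location = parts[1]
--             location_folder = parts[2]
--             item_number = ""
--         else:
--             for chain_account in chainAccounts:
--                 if chain_account in path:
--                     customer_location = parts[1]
--                     location_folder = parts[2]
--                     item_number = parts[3]
--                     found_chain_account = True
--                     break
--             if not found_chain_account:
--                 customer_location = parts[1]
--                 location_folder = parts[2]
--                 item_number = parts[3]
--
--     return customer_location, location_folder, item_number
-- ===== SOURCE B (Python) =====
-- catalog = "CATALOG"
--
-- chainAccounts = ["OG", "OBS", "LH", "CG", "BB", "RL", "Ruths Chris", "CH", "FPS"]
--
-- # (n, category) -> index triple; None -> ""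
-- _TABLE = {
--     (7, "catalog"): (1, 4, 5), (7, "chain"): (1, 4, 5), (7, "other"): (1, 4, 5),
--     (6, "catalog"): (1, 2, 3), (6, "chain"): (1, 3, 4), (6, "other"): (2, 3, 4),
--     (5, "catalog"): (1, 2, None), (5, "chain"): (1, 2, 3), (5, "other"): (1, 2, 3),
--     (4, "catalog"): (1, 2, None), (4, "chain"): (1, 2, 3), (4, "other"): (1, 2, 3),
--     (3, "catalog"): (1, 2, None), (3, "chain"): (1, 2, 3), (3, "other"): (1, 2, 3),
-- }
--
-- def breakdown_path(path):
--     if ':' in path: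
--         path = path.split(':', 1)[1]
--     parts = path.split('\\')
--     if catalog in path:
--         category = "catalog"
--     elif any(acct in path for acct in chainAccounts):
--         category = "chain"
--     else:
--         category = "other"
--     i, j, k = _TABLE.get((len(parts), category), (None, None, None))
--     pick = lambda i: parts[i] if i is not None and i < len(parts) else ""
--     return pick(i), pick(j), pick(k)
-- ===== Notes on version B (the rewrite author's own statement) =====
-- stated objective: simpler
-- what changed: A's five copy-pasted per-length if/elif blocks, each with its own CATALOG test and chain-account for-loop, are replaced by classifying the path once (catalog/chain/other) and one (num_parts, category) -> index-triple table lookup; Pre_ excludes paths whose stripped part splits into exactly 3 backslash-separated parts without 'CATALOG', on which A raises IndexError (parts[3]).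
import Mathlib
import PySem

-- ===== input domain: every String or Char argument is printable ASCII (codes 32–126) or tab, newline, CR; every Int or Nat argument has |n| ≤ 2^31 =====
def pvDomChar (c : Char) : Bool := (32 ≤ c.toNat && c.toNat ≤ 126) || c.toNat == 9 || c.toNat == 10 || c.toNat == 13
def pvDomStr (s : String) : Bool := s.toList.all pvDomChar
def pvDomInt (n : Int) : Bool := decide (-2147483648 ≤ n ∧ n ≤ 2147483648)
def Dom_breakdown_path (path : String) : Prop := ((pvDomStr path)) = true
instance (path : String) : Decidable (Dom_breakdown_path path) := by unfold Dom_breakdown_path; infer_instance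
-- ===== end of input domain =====

-- B replaces A's five copy-pasted per-length branch blocks by one (num_parts, category) table lookup
-- (objective: simpler); equal return values on Pre_ (where A does not raise IndexError).

def pvChainAccounts : List String := ["OG", "OBS", "LH", "CG", "BB", "RL", "Ruths Chris", "CH", "FPS"]

-- ===== PORT A =====
-- A's `for chain_account in chainAccounts: if … in path: <assign vals>; found = True; break`
-- loop: returns `some vals` on the first hit (found = True), `none` if the loop falls through.
def pvAChainLoop (p : String) (vals : String × String × String) :
    List String → Option (String × String × String)
  | [] => none
  | a :: r => if PySem.Str.isIn a p then some vals else pvAChainLoop p vals r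

def breakdown_path (path : String) : String × String × String :=
  let p := if PySem.Str.isIn ":" path
           then PySem.List.pyGetD ((PySem.Str.splitMax? path ":" 1).getD []) 1 ""
           else path
  let parts := (PySem.Str.split? p "\\").getD []
  let n := parts.length
  -- parts[i]; Pre_ keeps every reached index in range, so pyGetD's default is never used there
  let g : Int → String := fun i => PySem.List.pyGetD parts i ""
  if n = 7 then (g 1, g 4, g 5)
  else if n = 6 then
    if PySem.Str.isIn "CATALOG" p then (g 1, g 2, g 3)
    else match pvAChainLoop p (g 1, g 3, g 4) pvChainAccounts with
      | some v => v
      | none => (g 2, g 3, g 4)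
  else if n = 5 then
    if PySem.Str.isIn "CATALOG" p then (g 1, g 2, "")
    else match pvAChainLoop p (g 1, g 2, g 3) pvChainAccounts with
      | some v => v
      | none => (g 1, g 2, g 3)
  else if n = 4 then
    if PySem.Str.isIn "CATALOG" p then (g 1, g 2, "")
    else match pvAChainLoop p (g 1, g 2, g 3) pvChainAccounts with
      | some v => v
      | none => (g 1, g 2, g 3)
  else if n = 3 then
    if PySem.Str.isIn "CATALOG" p then (g 1, g 2, "")
    else match pvAChainLoop p (g 1, g 2, g 3) pvChainAccounts with
      | some v => v
      | none => (g 1, g 2, g 3)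
  else ("", "", "")

-- ===== PORT B =====
def pvTable : PySem.Dict (Int × String) (Option Int × Option Int × Option Int) :=
  ⟨[((7, "catalog"), (some 1, some 4, some 5)), ((7, "chain"), (some 1, some 4, some 5)),
   ((7, "other"), (some 1, some 4, some 5)),
   ((6, "catalog"), (some 1, some 2, some 3)), ((6, "chain"), (some 1, some 3, some 4)),
   ((6, "other"), (some 2, some 3, some 4)),
   ((5, "catalog"), (some 1, some 2, none)), ((5, "chain"), (some 1, some 2, some 3)),
   ((5, "other"), (some 1, some 2, some 3)),
   ((4, "catalog"), (some 1, some 2, none)), ((4, "chain"), (some 1, some 2, some 3)),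
   ((4, "other"), (some 1, some 2, some 3)),
   ((3, "catalog"), (some 1, some 2, none)), ((3, "chain"), (some 1, some 2, some 3)),
   ((3, "other"), (some 1, some 2, some 3))]⟩

def breakdown_path_alt (path : String) : String × String × String :=
  let p := if PySem.Str.isIn ":" path
           then PySem.List.pyGetD ((PySem.Str.splitMax? path ":" 1).getD []) 1 ""
           else path
  let parts := (PySem.Str.split? p "\\").getD []
  let category := if PySem.Str.isIn "CATALOG" p then "catalog"
    else if pvChainAccounts.any (fun a => PySem.Str.isIn a p) then "chain"
    else "other"
  let t := PySem.Dict.getD pvTable ((parts.length : Int), category) (none, none, none)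
  let pick : Option Int → String := fun i => match i with
    | some j => if j < (parts.length : Int) then PySem.List.pyGetD parts j "" else ""
    | none => ""
  (pick t.1, pick t.2.1, pick t.2.2)

-- ===== PRECONDITION & SPEC =====
-- Pre_ excludes exactly the inputs whose stripped path splits into 3 parts without "CATALOG":
-- there A evaluates parts[3] and raises IndexError.
def Pre_breakdown_path (path : String) : Prop :=
  ¬ (let p := if PySem.Str.isIn ":" path
              then PySem.List.pyGetD ((PySem.Str.splitMax? path ":" 1).getD []) 1 ""
              else path
     ((PySem.Str.split? p "\\").getD []).length = 3 ∧ PySem.Str.isIn "CATALOG" p = false)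
instance (path : String) : Decidable (Pre_breakdown_path path) := by
  unfold Pre_breakdown_path; infer_instance

def pvWitness_breakdown_path : String := "N:\\ACME\\CATALOG\\Signs\\1001\\1001.pdf\\"

def Spec_breakdown_path (path : String) (out : String × String × String) : Prop :=
  out = breakdown_path_alt path
instance (path : String) (out : String × String × String) : Decidable (Spec_breakdown_path path out) := by unfold Spec_breakdown_path; infer_instance

-- ===== CLAIM (what is proved, stated in full; the proofs are below) =====
def Claim_equal_breakdown_path : Prop := ∀ (path : String), Dom_breakdown_path path → Pre_breakdown_path path → Spec_breakdown_path path (breakdown_path path)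

-- ===== LEMMAS AND PROOFS =====

theorem pvAChainLoop_eq_any (p : String) (vals : String × String × String) (l : List String) :
    pvAChainLoop p vals l = if l.any (fun a => PySem.Str.isIn a p) then some vals else none := by
  induction l with
  | nil => simp [pvAChainLoop]
  | cons a r ih =>
    cases h : PySem.Str.isIn a p with
    | true =>
      simp only [pvAChainLoop, List.any_cons, h, Bool.true_or, if_true]
    | false =>
      simp only [pvAChainLoop, List.any_cons, h, Bool.false_or, ih,
        Bool.false_eq_true, if_false]

-- ===== VERDICT (by name: the statement is the Claim_ definition above) =====
theorem breakdown_path_spec : Claim_equal_breakdown_path := by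
  intro path _ hpre
  unfold Spec_breakdown_path breakdown_path breakdown_path_alt
  unfold Pre_breakdown_path at hpre
  dsimp only at hpre ⊢
  generalize hP : (if PySem.Str.isIn ":" path = true then PySem.List.pyGetD ((PySem.Str.splitMax? path ":" 1).getD []) 1 "" else path) = p at hpre ⊢
  generalize hQ : (PySem.Str.split? p "\\").getD [] = parts at hpre ⊢
  simp only [pvAChainLoop_eq_any]
  cases hc : PySem.Str.isIn "CATALOG" p with
  | true =>
    simp only [if_true] at ⊢
    by_cases h7 : parts.length = 7
    · rw [h7]; rfl
    rw [if_neg h7]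
    by_cases h6 : parts.length = 6
    · rw [h6]; rfl
    rw [if_neg h6]
    by_cases h5 : parts.length = 5
    · rw [h5]; rfl
    rw [if_neg h5]
    by_cases h4 : parts.length = 4
    · rw [h4]; rfl
    rw [if_neg h4]
    by_cases h3 : parts.length = 3
    · rw [h3]; rfl
    rw [if_neg h3]
    have h7' : ((parts.length : Int)) ≠ 7 := by exact_mod_cast h7
    have h6' : ((parts.length : Int)) ≠ 6 := by exact_mod_cast h6
    have h5' : ((parts.length : Int)) ≠ 5 := by exact_mod_cast h5
    have h4' : ((parts.length : Int)) ≠ 4 := by exact_mod_cast h4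
    have h3' : ((parts.length : Int)) ≠ 3 := by exact_mod_cast h3
    simp [pvTable, PySem.Dict.getD, PySem.Dict.get?, List.find?, BEq.beq, Ne.symm h7', Ne.symm h6', Ne.symm h5', Ne.symm h4', Ne.symm h3']
  | false =>
    simp only [Bool.false_eq_true, if_false] at ⊢
    simp only [not_and] at hpre
    have hpre : parts.length ≠ 3 := fun h => (hpre h) hc
    cases ha : pvChainAccounts.any (fun a => PySem.Str.isIn a p) with
    | true =>
      simp only [if_true] at ⊢
      by_cases h7 : parts.length = 7
      · rw [h7]; rfl
      rw [if_neg h7]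
      by_cases h6 : parts.length = 6
      · rw [h6]; rfl
      rw [if_neg h6]
      by_cases h5 : parts.length = 5
      · rw [h5]; rfl
      rw [if_neg h5]
      by_cases h4 : parts.length = 4
      · rw [h4]; rfl
      rw [if_neg h4]
      by_cases h3 : parts.length = 3
      · exact absurd h3 hpre
      rw [if_neg h3]
      have h7' : ((parts.length : Int)) ≠ 7 := by exact_mod_cast h7
      have h6' : ((parts.length : Int)) ≠ 6 := by exact_mod_cast h6
      have h5' : ((parts.length : Int)) ≠ 5 := by exact_mod_cast h5
      have h4' : ((parts.length : Int)) ≠ 4 := by exact_mod_cast h4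
      have h3' : ((parts.length : Int)) ≠ 3 := by exact_mod_cast h3
      simp [pvTable, PySem.Dict.getD, PySem.Dict.get?, List.find?, BEq.beq, Ne.symm h7', Ne.symm h6', Ne.symm h5', Ne.symm h4', Ne.symm h3']
    | false =>
      simp only [Bool.false_eq_true, if_false] at ⊢
      by_cases h7 : parts.length = 7
      · rw [h7]; rfl
      rw [if_neg h7]
      by_cases h6 : parts.length = 6
      · rw [h6]; rfl
      rw [if_neg h6]
      by_cases h5 : parts.length = 5
      · rw [h5]; rfl
      rw [if_neg h5]
      by_cases h4 : parts.length = 4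
      · rw [h4]; rfl
      rw [if_neg h4]
      by_cases h3 : parts.length = 3
      · exact absurd h3 hpre
      rw [if_neg h3]
      have h7' : ((parts.length : Int)) ≠ 7 := by exact_mod_cast h7
      have h6' : ((parts.length : Int)) ≠ 6 := by exact_mod_cast h6
      have h5' : ((parts.length : Int)) ≠ 5 := by exact_mod_cast h5
      have h4' : ((parts.length : Int)) ≠ 4 := by exact_mod_cast h4
      have h3' : ((parts.length : Int)) ≠ 3 := by exact_mod_cast h3
      simp [pvTable, PySem.Dict.getD, PySem.Dict.get?, List.find?, BEq.beq, Ne.symm h7', Ne.symm h6', Ne.symm h5', Ne.symm h4', Ne.symm h3']
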